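-- pv_equiv track=rewrite | github.com/anmolk11/phonepay-analyser- | main.py | process_trasaction_text
-- ===== SOURCE A (Python) =====
-- def process_trasaction_text(tail):
--     transactions = []
--     i = 0
--     N = len(tail)
--     while i < N:
--         curr = []
--         while i < N and (not tail[i].startswith('Paid by')):
--             curr.append(tail[i])
--             i += 1
--         if i < N:
--             curr.append(tail[i])
--         transactions.append(curr)
--         i += 1
--
--     return transactions
-- ===== SOURCE B (Python) =====
-- def process_trasaction_text(tail):
--     transactions = []
--     curr = []
--     for line in tail:
--         curr.append(line)
--         if line.startswith('Paid by'):
--             transactions.append(curr)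
--             curr = []
--     if curr:
--         transactions.append(curr)
--     return transactions
-- ===== Notes on version B (the rewrite author's own statement) =====
-- stated objective: simpler
-- what changed: Replaced the index-driven outer/inner while-loop pair with a single streaming for-loop using an accumulator that flushes on each 'Paid by' marker, with a guarded final flush.
import Mathlib
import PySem

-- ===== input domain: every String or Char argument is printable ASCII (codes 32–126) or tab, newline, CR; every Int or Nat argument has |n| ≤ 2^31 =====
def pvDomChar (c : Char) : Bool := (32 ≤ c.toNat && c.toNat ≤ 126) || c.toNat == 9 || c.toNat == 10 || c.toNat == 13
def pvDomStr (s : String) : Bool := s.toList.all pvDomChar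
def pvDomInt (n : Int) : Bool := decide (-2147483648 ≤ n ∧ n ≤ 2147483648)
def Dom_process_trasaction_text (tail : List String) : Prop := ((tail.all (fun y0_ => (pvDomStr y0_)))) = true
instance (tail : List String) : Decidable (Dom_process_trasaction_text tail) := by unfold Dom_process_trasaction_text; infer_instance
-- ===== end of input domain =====

-- B replaces A's index-driven nested while-loops with a single streaming fold
-- that flushes the current chunk at each 'Paid by' marker (objective: simpler).


-- ===== PORT A =====
-- A's inner while collects lines into curr until a 'Paid by' marker (appending the
-- marker too), appends curr to transactions, and the outer while re-enters only
-- while i < N; pvAgo is that pair of loops as structural recursion on the rest.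
def pvAgo (curr : List String) : List String → List (List String)
  | [] => [curr]
  | x :: xs =>
    if PySem.Str.startswith x "Paid by" then
      (curr ++ [x]) :: (if xs.isEmpty then [] else pvAgo [] xs)
    else
      pvAgo (curr ++ [x]) xs

def process_trasaction_text (tail : List String) : List (List String) :=
  if tail.isEmpty then [] else pvAgo [] tail

-- ===== PORT B =====
-- one fold carrying (transactions, curr), flushing curr at each marker
def pvBstep (p : List (List String) × List String) (line : String) :
    List (List String) × List String :=
  let curr := p.2 ++ [line]
  if PySem.Str.startswith line "Paid by" then (p.1 ++ [curr], []) else (p.1, curr)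

def process_trasaction_text_alt (tail : List String) : List (List String) :=
  let r := tail.foldl pvBstep ([], [])
  if r.2.isEmpty then r.1 else r.1 ++ [r.2]

-- ===== PRECONDITION & SPEC =====
def Spec_process_trasaction_text (tail : List String) (out : List (List String)) : Prop := out = process_trasaction_text_alt tail
instance (tail : List String) (out : List (List String)) : Decidable (Spec_process_trasaction_text tail out) := by unfold Spec_process_trasaction_text; infer_instance

-- ===== CLAIM (what is proved, stated in full; the proofs are below) =====
def Claim_equal_process_trasaction_text : Prop := ∀ (tail : List String), Dom_process_trasaction_text tail → Spec_process_trasaction_text tail (process_trasaction_text tail)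

-- ===== LEMMAS AND PROOFS =====
theorem pv_fold_inv (l : List String) :
    ∀ (curr : List String) (acc : List (List String)), (l ≠ [] ∨ curr ≠ []) →
    (let r := l.foldl pvBstep (acc, curr)
     if r.2.isEmpty then r.1 else r.1 ++ [r.2]) = acc ++ pvAgo curr l := by
  induction l with
  | nil =>
    intro curr acc h
    rcases h with h | h
    · exact absurd rfl h
    · simp only [List.foldl_nil, pvAgo]
      rw [if_neg (by simpa [List.isEmpty_iff] using h)]
  | cons x xs ih =>
    intro curr acc _
    cases hm : PySem.Str.startswith x "Paid by" with
    | true =>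
      by_cases hxs : xs = []
      · subst hxs
        simp only [List.foldl_cons, List.foldl_nil, pvBstep, hm, if_pos, pvAgo,
          List.isEmpty_nil, if_true]
      · have h2 := ih [] (acc ++ [curr ++ [x]]) (Or.inl hxs)
        simp only [List.foldl_cons, pvBstep, hm, if_pos] at h2 ⊢
        have hm' : PySem.Chars.startswith x.toList ['P','a','i','d',' ','b','y'] = true := by
          simpa [PySem.Str.startswith] using hm
        rw [h2]
        simp [pvAgo, hm', hxs]
    | false =>
      have h2 := ih (curr ++ [x]) acc (Or.inr (by simp))
      simp only [List.foldl_cons, pvBstep, hm, Bool.false_eq_true, if_false] at h2 ⊢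
      have hm' : PySem.Chars.startswith x.toList ['P','a','i','d',' ','b','y'] = false := by
        simpa [PySem.Str.startswith] using hm
      rw [h2]
      simp [pvAgo, hm']

-- ===== VERDICT (by name: the statement is the Claim_ definition above) =====
theorem process_trasaction_text_spec : Claim_equal_process_trasaction_text := by
  intro tail _
  show process_trasaction_text tail = process_trasaction_text_alt tail
  cases tail with
  | nil => rfl
  | cons x xs =>
    have := pv_fold_inv (x :: xs) [] [] (Or.inl (by simp))
    simpa [process_trasaction_text, process_trasaction_text_alt] using this.symm
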